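-- pv_equiv track=rewrite | github.com/bam0/ProjectEulerProblems | Problems_61-80/P61_Cyclical_Fig_Nums.py | fig
-- ===== SOURCE A (Python) =====
-- def fig(v, n):
--     i = m = 1
--     r = 10**n                       # Limit search to 4 digit numbers
--     D = {}                          # Initialize dictionary
--     while m < r:
--         fir, las = divmod(m, 100)   # Get the first and last pair of digits
--         if fir > 9 and las > 9:
--             if fir not in D:        # Create the key value pair
--                 D[fir] = [las]
--             else:
--                 D[fir].append(las)  # Otherwise add more valid digits to the list
--         i += v
--         m += i
--     return D
-- ===== SOURCE B (Python) =====
-- def fig(v, n):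
--     if n < 1:                       # 10**n <= 1 while m starts at 1: no figurate number below the limit
--         return {}
--     r = 10 ** n
--     D = {}
--     for k in range(r - 1):          # the k-th figurate number in closed form; k+1 <= m, so k stays < r-1
--         m = v * k * (k + 1) // 2 + k + 1
--         if m >= r:
--             break
--         fir, las = divmod(m, 100)
--         if fir > 9 and las > 9:
--             D.setdefault(fir, []).append(las)
--     return D
-- ===== Notes on version B (the rewrite author's own statement) =====
-- stated objective: alternative
-- what changed: B drops A's two running accumulators (i and m) and instead computes each figurate number in closed form from its index k (m = v*k*(k+1)//2 + k + 1), iterating k over range(10**n - 1) with an early break once m reaches the limit.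
import Mathlib
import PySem

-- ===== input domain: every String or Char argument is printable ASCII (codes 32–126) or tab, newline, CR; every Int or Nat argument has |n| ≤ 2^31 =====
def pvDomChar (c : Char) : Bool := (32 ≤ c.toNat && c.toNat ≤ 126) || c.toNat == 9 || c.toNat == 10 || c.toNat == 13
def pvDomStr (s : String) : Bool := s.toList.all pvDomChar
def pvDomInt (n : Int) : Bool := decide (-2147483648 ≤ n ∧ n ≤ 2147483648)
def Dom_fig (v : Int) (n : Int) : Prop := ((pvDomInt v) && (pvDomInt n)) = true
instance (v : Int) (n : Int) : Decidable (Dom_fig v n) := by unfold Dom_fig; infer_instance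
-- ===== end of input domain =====

-- B replaces A's two running accumulators (i, m) by computing each figurate number in closed
-- form from its index k, iterating k over a bounded range with an early break (objective: alternative).

-- ===== PORT A =====
-- A's while-loop with running accumulators i and m.  The fuel argument is a totality guard only:
-- fig passes r.toNat, which suffices on Pre_fig (m starts at 1 and grows by at least 1 per step).
def figLoopA : Nat → Int → Int → Int → Int → PySem.Dict Int (List Int) → PySem.Dict Int (List Int)
  | 0, _, _, _, _, D => D
  | f + 1, v, r, i, m, D =>
    if m < r then
      let fir := PySem.Int.floordiv m 100
      let las := PySem.Int.mod m 100
      let D' := if 9 < fir ∧ 9 < las then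
          match D.get? fir with
          | none => D.insert fir [las]
          | some l => D.insert fir (l ++ [las])
        else D
      figLoopA f v r (i + v) (m + (i + v)) D'
    else D

def fig (v : Int) (n : Int) : List (Int × List Int) :=
  -- Python's 10**n is a float < 1 when n < 0 while m ≥ 1 at every test, so r := 0 keeps 'm < r' exact there
  let r : Int := if 0 ≤ n then 10 ^ n.toNat else 0
  (figLoopA r.toNat v r 1 1 PySem.Dict.empty).items

-- ===== PORT B =====
-- B's for-loop over range(r - 1) with a break; m computed in closed form from k.
-- D.setdefault(fir, []).append(las) is PySem.Dict.modify fir [] (· ++ [las]).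
def figLoopB (v r : Int) : List Int → PySem.Dict Int (List Int) → PySem.Dict Int (List Int)
  | [], D => D
  | k :: ks, D =>
    let m := PySem.Int.floordiv (v * k * (k + 1)) 2 + k + 1
    if r ≤ m then D
    else
      let fir := PySem.Int.floordiv m 100
      let las := PySem.Int.mod m 100
      let D' := if 9 < fir ∧ 9 < las then D.modify fir [] (· ++ [las]) else D
      figLoopB v r ks D'

def fig_alt (v : Int) (n : Int) : List (Int × List Int) :=
  if n < 1 then []
  else
    let r : Int := 10 ^ n.toNat
    (figLoopB v r (PySem.List.pyRange 0 (r - 1) 1) PySem.Dict.empty).items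

-- ===== PRECONDITION & SPEC =====
-- Pre_fig excludes v < 0 with n ≥ 1, on which A's while-loop never terminates (m stays below 10**n forever).
def Pre_fig (v : Int) (n : Int) : Prop := 0 ≤ v ∨ n ≤ 0
instance (v : Int) (n : Int) : Decidable (Pre_fig v n) := by unfold Pre_fig; infer_instance
def pvWitness_fig : Int × Int := (1, 2)

def Spec_fig (v : Int) (n : Int) (out : List (Int × List Int)) : Prop := out = fig_alt v n
instance (v : Int) (n : Int) (out : List (Int × List Int)) : Decidable (Spec_fig v n out) := by unfold Spec_fig; infer_instance

-- ===== CLAIM (what is proved, stated in full; the proofs are below) =====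
def Claim_equal_fig : Prop := ∀ (v : Int) (n : Int), Dom_fig v n → Pre_fig v n → Spec_fig v n (fig v n)

-- ===== LEMMAS AND PROOFS =====

-- B's closed-form value of m at index k
def figM (v k : Int) : Int := PySem.Int.floordiv (v * k * (k + 1)) 2 + k + 1

theorem figM_zero (v : Int) : figM v 0 = 1 := by
  simp [figM, PySem.Int.floordiv, Int.fdiv]

-- the closed form satisfies A's recurrence m += (i += v): k*(k+1) is always even, so the
-- floor division is exact and shifts through the sum
theorem figM_succ (v k : Int) : figM v (k + 1) = figM v k + (1 + v * (k + 1)) := by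
  have h : v * (k + 1) * (k + 1 + 1) = v * k * (k + 1) + (v * (k + 1)) * 2 := by ring
  show PySem.Int.floordiv (v * (k + 1) * (k + 1 + 1)) 2 + (k + 1) + 1 = _
  rw [h]
  show (v * k * (k + 1) + v * (k + 1) * 2).fdiv 2 + (k + 1) + 1 =
    (v * k * (k + 1)).fdiv 2 + k + 1 + (1 + v * (k + 1))
  rw [Int.add_mul_fdiv_right _ _ (by norm_num)]
  ring

theorem figM_lb (v k : Int) (hv : 0 ≤ v) (hk : 0 ≤ k) : k + 1 ≤ figM v k := by
  have h : (0 : Int) ≤ (v * k * (k + 1)).fdiv 2 :=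
    Int.fdiv_nonneg (by positivity) (by norm_num)
  have e : PySem.Int.floordiv (v * k * (k + 1)) 2 = (v * k * (k + 1)).fdiv 2 := rfl
  show PySem.Int.floordiv (v * k * (k + 1)) 2 + k + 1 ≥ k + 1
  omega

-- A's dict-update branch equals B's (setdefault + append = modify with default [])
theorem dictStep_eq (D : PySem.Dict Int (List Int)) (fir las : Int) :
    (match D.get? fir with
      | none => D.insert fir [las]
      | some l => D.insert fir (l ++ [las])) = D.modify fir [] (· ++ [las]) := by
  have hmod : D.modify fir [] (· ++ [las]) = D.insert fir (D.getD fir [] ++ [las]) := rfl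
  rw [hmod, PySem.Dict.getD_eq_get?_getD]
  cases h : D.get? fir <;> simp

-- once the break condition holds, B's remaining loop does nothing
theorem loopB_done (v r k : Int) (D : PySem.Dict Int (List Int)) (hm : r ≤ figM v k) :
    figLoopB v r (PySem.List.pyRange k (r - 1) 1) D = D := by
  by_cases h : r - 1 ≤ k
  · rw [PySem.List.pyRange_one_eq_nil h]
    rfl
  · rw [PySem.List.pyRange_one_cons (by omega)]
    show (if r ≤ figM v k then D else _) = D
    rw [if_pos hm]

-- main correspondence: A at state (i, m) = (1 + v*k, figM v k) equals B on the range tail from k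
theorem loopAB (f : Nat) (v r : Int) (hv : 0 ≤ v) :
    ∀ (k : Int) (D : PySem.Dict Int (List Int)), 0 ≤ k → (r - figM v k).toNat ≤ f →
      figLoopA f v r (1 + v * k) (figM v k) D = figLoopB v r (PySem.List.pyRange k (r - 1) 1) D := by
  induction f with
  | zero =>
    intro k D hk hf
    rw [loopB_done v r k D (by omega)]
    rfl
  | succ f ih =>
    intro k D hk hf
    by_cases hm : figM v k < r
    · have hklt : k < r - 1 := by have := figM_lb v k hv hk; omega
      rw [PySem.List.pyRange_one_cons (by omega)]
      show (if figM v k < r then _ else D) =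
        (if r ≤ figM v k then D else figLoopB v r (PySem.List.pyRange (k + 1) (r - 1) 1)
          (if 9 < PySem.Int.floordiv (figM v k) 100 ∧ 9 < PySem.Int.mod (figM v k) 100 then
            D.modify (PySem.Int.floordiv (figM v k) 100) [] (· ++ [PySem.Int.mod (figM v k) 100])
          else D))
      rw [if_pos hm, if_neg (by omega)]
      show figLoopA f v r ((1 + v * k) + v) (figM v k + ((1 + v * k) + v))
          (if 9 < PySem.Int.floordiv (figM v k) 100 ∧ 9 < PySem.Int.mod (figM v k) 100 then
            match D.get? (PySem.Int.floordiv (figM v k) 100) with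
            | none => D.insert (PySem.Int.floordiv (figM v k) 100) [PySem.Int.mod (figM v k) 100]
            | some l => D.insert (PySem.Int.floordiv (figM v k) 100) (l ++ [PySem.Int.mod (figM v k) 100])
          else D) = _
      rw [dictStep_eq]
      have hstate1 : (1 + v * k) + v = 1 + v * (k + 1) := by ring
      have hstate2 : figM v k + ((1 + v * k) + v) = figM v (k + 1) := by rw [figM_succ]; ring
      rw [hstate2, hstate1]
      have hfuel : (r - figM v (k + 1)).toNat ≤ f := by
        have h1 : figM v k + 1 ≤ figM v (k + 1) := by
          rw [figM_succ]
          have : 0 ≤ v * (k + 1) := by positivity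
          omega
        omega
      exact ih (k + 1) _ (by omega) hfuel
    · rw [loopB_done v r k D (by omega)]
      show (if figM v k < r then _ else D) = D
      rw [if_neg hm]

-- ===== VERDICT (by name: the statement is the Claim_ definition above) =====
theorem fig_spec : Claim_equal_fig := by
  intro v n _ hpre
  show fig v n = fig_alt v n
  by_cases hn : n ≤ 0
  · -- r ≤ 1 while m starts at 1: neither loop runs, both return the empty dict
    unfold fig fig_alt
    rw [if_pos (by omega : n < 1)]
    by_cases h0 : 0 ≤ n
    · have hn0 : n = 0 := le_antisymm hn h0
      subst hn0
      rfl
    · rw [if_neg h0]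
      rfl
  · have hv : 0 ≤ v := hpre.resolve_right hn
    unfold fig fig_alt
    rw [if_pos (by omega : 0 ≤ n), if_neg (by omega : ¬ n < 1)]
    show (figLoopA ((10:Int) ^ n.toNat).toNat v (10 ^ n.toNat) 1 1 PySem.Dict.empty).items
      = (figLoopB v (10 ^ n.toNat) (PySem.List.pyRange 0 (10 ^ n.toNat - 1) 1) PySem.Dict.empty).items
    have h := loopAB ((10 ^ n.toNat : Int)).toNat v (10 ^ n.toNat : Int) hv 0
      PySem.Dict.empty le_rfl (by
        rw [figM_zero]
        have : (1 : Int) ≤ 10 ^ n.toNat := one_le_pow₀ (by norm_num)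
        omega)
    rw [figM_zero] at h
    simp only [mul_zero, add_zero] at h
    rw [h]
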